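-- pv_equiv track=rewrite | github.com/vezyldicode/The_Impossible_Key | assets/quizzes/Rules_Dictionary.py | digit_difference_prime
-- ===== SOURCE A (Python) =====
-- def digit_difference_prime(password):
--     """Hiệu của chữ số lớn nhất và nhỏ nhất là số nguyên tố"""
--     def is_prime(n):
--         if n < 2:
--             return False
--         for i in range(2, int(n ** 0.5) + 1):
--             if n % i == 0:
--                 return False
--         return True
--     nums = [int(c) for c in password if c.isdigit()]
--     if len(nums) < 2:
--         return False
--     return is_prime(max(nums) - min(nums))
-- ===== SOURCE B (Python) =====
-- # The result depends only on WHICH digits occur in the password: fewer than two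
-- # digit characters means the digit set is empty or a singleton, whose mask is
-- # never in the table (difference 0 is not prime).  So precompute, once, the set
-- # of all 10-bit digit-presence masks whose bit-span is prime, and at runtime
-- # just OR the input's digits into a mask and look it up.
-- _GOOD = frozenset(
--     m for m in range(1, 1024)
--     if max(d for d in range(10) if m >> d & 1)
--     - min(d for d in range(10) if m >> d & 1) in (2, 3, 5, 7)
-- )
--
--
-- def digit_difference_prime(password):
--     """Hiệu của chữ số lớn nhất và nhỏ nhất là số nguyên tố"""
--     mask = 0
--     for c in password:
--         if c.isdigit():
--             mask |= 1 << (ord(c) - 48)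
--     return mask in _GOOD
-- ===== Notes on version B (the rewrite author's own statement) =====
-- stated objective: alternative
-- what changed: B replaces A's digit list, max()/min() scans and trial-division is_prime by a 10-bit digit-presence bitmask ORed up in one pass and a membership lookup in a table of good masks precomputed once over all 1024 masks; this is correct because the result depends only on which digits occur (fewer than two digit characters gives an empty or single-bit mask, which is never in the table since 0 is not prime).
import Mathlib
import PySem

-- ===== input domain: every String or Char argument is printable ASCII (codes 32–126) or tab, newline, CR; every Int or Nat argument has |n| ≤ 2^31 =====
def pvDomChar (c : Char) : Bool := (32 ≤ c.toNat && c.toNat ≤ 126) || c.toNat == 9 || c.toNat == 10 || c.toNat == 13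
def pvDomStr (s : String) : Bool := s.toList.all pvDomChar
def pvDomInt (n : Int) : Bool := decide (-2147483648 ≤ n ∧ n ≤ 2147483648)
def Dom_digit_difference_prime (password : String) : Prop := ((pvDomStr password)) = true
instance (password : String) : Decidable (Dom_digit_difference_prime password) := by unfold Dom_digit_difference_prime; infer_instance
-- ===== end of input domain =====

-- B change (objective: alternative): the answer depends only on WHICH digits occur,
-- so B ORs the digits of the password into a 10-bit presence bitmask and looks it
-- up in a table of good masks precomputed once over all 1024 masks — no digit list,
-- no runtime min/max passes, no trial division.

-- ===== PORT A =====
-- is_prime: the 'for i in range(2, int(n**0.5)+1)' loop with early 'return False' is .all;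
-- int(n ** 0.5) is ported as Nat.sqrt (floor square root), exact for the arguments this
-- program actually passes (differences of two decimal digits, 0–9).
def pvIsPrime (n : Int) : Bool :=
  if n < 2 then false
  else (PySem.List.pyRange 2 ((Nat.sqrt n.toNat : Int) + 1) 1).all
    (fun i => !(PySem.Int.mod n i == 0))

def digit_difference_prime (password : String) : Bool :=
  let nums := (password.toList.filter PySem.Chars.isdigit).map
    (fun c => (PySem.Int.ofChars? [c]).getD 0)
  if nums.length < 2 then false
  else pvIsPrime ((PySem.List.max? nums (fun x => x)).getD 0 -
                  (PySem.List.min? nums (fun x => x)).getD 0)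

-- ===== PORT B =====
-- the generator '(d for d in range(10) if m >> d & 1)': range(10) is List.range 10
-- (values 0–9, exact); 'm >> d & 1' is (m >>> d) &&& 1 on Nat (m, d ≥ 0, exact)
def pvBits (m : Nat) : List Nat :=
  (List.range 10).filter (fun d => (m >>> d) &&& 1 == 1)

-- the module-level table _GOOD: frozenset → PySem.Set; range(1, 1024) is
-- List.range' 1 1023 (values 1–1023, all positive, exact); max(gen)/min(gen)
-- are PySem.List.max?/min? (never empty here since m ≥ 1), int subtraction in Int
def pvGood : PySem.Set Nat :=
  PySem.Set.ofList ((List.range' 1 1023).filter (fun m =>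
    [(2 : Int), 3, 5, 7].contains
      ((((PySem.List.max? (pvBits m) (fun x => x)).getD 0 : Nat) : Int) -
       (((PySem.List.min? (pvBits m) (fun x => x)).getD 0 : Nat) : Int))))

-- loop body of Source B: 'mask |= 1 << (ord(c) - 48)' (ord c = c.toNat; digits give 0–9)
def pvMaskStep (mask : Nat) (c : Char) : Nat :=
  if PySem.Chars.isdigit c then mask ||| (1 <<< (c.toNat - 48)) else mask

def digit_difference_prime_alt (password : String) : Bool :=
  PySem.Set.contains pvGood (password.toList.foldl pvMaskStep 0)

-- ===== PRECONDITION & SPEC =====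
def Spec_digit_difference_prime (password : String) (out : Bool) : Prop := out = digit_difference_prime_alt password
instance (password : String) (out : Bool) : Decidable (Spec_digit_difference_prime password out) := by unfold Spec_digit_difference_prime; infer_instance

-- ===== CLAIM (what is proved, stated in full; the proofs are below) =====
def Claim_equal_digit_difference_prime : Prop := ∀ (password : String), Dom_digit_difference_prime password → Spec_digit_difference_prime password (digit_difference_prime password)

-- ===== LEMMAS AND PROOFS =====

-- a char satisfying Python's c.isdigit() is one of the ten ASCII digits
theorem pv_digit_mem (c : Char) (h : PySem.Chars.isdigit c = true) :
    c ∈ ['0','1','2','3','4','5','6','7','8','9'] := by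
  simp [PySem.Chars.isdigit, Char.le_def] at h
  obtain ⟨h1, h2⟩ := h
  have h1' : 48 ≤ c.val.toNat := h1
  have h2' : c.val.toNat ≤ 57 := h2
  have hd : c.val.toNat = 48 ∨ c.val.toNat = 49 ∨ c.val.toNat = 50 ∨ c.val.toNat = 51 ∨
      c.val.toNat = 52 ∨ c.val.toNat = 53 ∨ c.val.toNat = 54 ∨ c.val.toNat = 55 ∨
      c.val.toNat = 56 ∨ c.val.toNat = 57 := by omega
  have hc : ∀ n : Nat, c.val.toNat = n → c.val = UInt32.ofNat n := by
    intro n hn; apply UInt32.toNat_inj.mp; rw [hn]; simp; omega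
  rcases hd with h|h|h|h|h|h|h|h|h|h <;>
    (have hv := hc _ h; simp only [List.mem_cons, List.not_mem_nil, or_false];
     repeat first | exact Or.inl (Char.ext hv) | exact Char.ext hv | apply Or.inr)

-- A's int(c) agrees with B's ord(c) - 48 on digit chars, and is < 10
theorem pv_digit_val (c : Char) (h : PySem.Chars.isdigit c = true) :
    (PySem.Int.ofChars? [c]).getD 0 = ((c.toNat - 48 : Nat) : Int) ∧ c.toNat - 48 < 10 := by
  have := pv_digit_mem c h
  fin_cases this <;> exact ⟨by decide, by decide⟩

-- B's fold over the string is the fold of '1 <<< digit' over A's filtered digit chars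
theorem pv_maskfold (cs : List Char) : ∀ acc : Nat,
    cs.foldl pvMaskStep acc =
      ((cs.filter PySem.Chars.isdigit).map (fun c => c.toNat - 48)).foldl
        (fun m d => m ||| (1 <<< d)) acc := by
  induction cs with
  | nil => intro acc; rfl
  | cons c t ih =>
    intro acc
    by_cases h : PySem.Chars.isdigit c = true
    · simp only [List.foldl_cons, pvMaskStep, h, if_true,
        List.filter_cons_of_pos h, List.map_cons]
      exact ih _
    · have hb : PySem.Chars.isdigit c = false := by simpa using h
      rw [List.filter_cons_of_neg (by simp [hb])]
      simp only [List.foldl_cons, pvMaskStep, hb, Bool.false_eq_true, if_false]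
      exact ih _

-- bit k of the accumulated mask says whether k occurs among the digit values
theorem pv_testBit (dns : List Nat) : ∀ (acc k : Nat),
    (dns.foldl (fun m d => m ||| (1 <<< d)) acc).testBit k
      = (acc.testBit k || decide (k ∈ dns)) := by
  induction dns with
  | nil => intro acc k; simp
  | cons d t ih =>
    intro acc k
    rw [List.foldl_cons, ih]
    have : (1 : Nat) <<< d = 2 ^ d := by simp [Nat.shiftLeft_eq]
    simp [Nat.testBit_or, this, Nat.testBit_two_pow, List.mem_cons, eq_comm,
      Bool.or_assoc]

-- digit values are < 10, so the mask stays below 2^10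
theorem pv_mask_lt (dns : List Nat) : ∀ acc : Nat, (∀ d ∈ dns, d < 10) → acc < 1024 →
    dns.foldl (fun m d => m ||| (1 <<< d)) acc < 1024 := by
  induction dns with
  | nil => intro acc _ h; simpa using h
  | cons d t ih =>
    intro acc hd hacc
    rw [List.foldl_cons]
    refine ih _ (fun x hx => hd x (List.mem_cons_of_mem _ hx)) ?_
    have h1 : (1 : Nat) <<< d = 2 ^ d := by simp [Nat.shiftLeft_eq]
    have h2 : 2 ^ d < 2 ^ 10 :=
      Nat.pow_lt_pow_right (by norm_num) (hd d (List.mem_cons_self ..))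
    have := Nat.or_lt_two_pow (x := acc) (y := 1 <<< d) (n := 10) hacc (by rw [h1]; exact h2)
    simpa using this
-- the filter in pvBits tests exactly testBit
theorem pv_bits_mem (m k : Nat) : k ∈ pvBits m ↔ k < 10 ∧ m.testBit k := by
  unfold pvBits
  rw [List.mem_filter, List.mem_range]
  constructor
  · rintro ⟨h1, h2⟩
    refine ⟨h1, ?_⟩
    simp [Nat.testBit, Nat.and_comm] at h2 ⊢
    omega
  · rintro ⟨h1, h2⟩
    refine ⟨h1, ?_⟩
    simp [Nat.testBit, Nat.and_comm] at h2 ⊢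
    omega

-- two nonempty lists with the same elements have the same running max (resp. min)
theorem pv_max_ext {α : Type} [LinearOrder α] (x y : α) (xs ys : List α)
    (h : ∀ a, a ∈ x :: xs ↔ a ∈ y :: ys) : xs.foldl max x = ys.foldl max y := by
  have hmx : xs.foldl max x ∈ x :: xs := by
    rcases PySem.List.foldl_max_mem xs x with he | he
    · rw [he]; exact List.mem_cons_self ..
    · exact List.mem_cons_of_mem _ he
  have hmy : ys.foldl max y ∈ y :: ys := by
    rcases PySem.List.foldl_max_mem ys y with he | he
    · rw [he]; exact List.mem_cons_self ..
    · exact List.mem_cons_of_mem _ he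
  have ubx : ∀ a ∈ x :: xs, a ≤ xs.foldl max x := by
    intro a ha
    rcases List.mem_cons.mp ha with rfl | h'
    · exact (PySem.List.le_foldl_max xs a).1
    · exact (PySem.List.le_foldl_max xs x).2 a h'
  have uby : ∀ a ∈ y :: ys, a ≤ ys.foldl max y := by
    intro a ha
    rcases List.mem_cons.mp ha with rfl | h'
    · exact (PySem.List.le_foldl_max ys a).1
    · exact (PySem.List.le_foldl_max ys y).2 a h'
  exact le_antisymm (uby _ ((h _).mp hmx)) (ubx _ ((h _).mpr hmy))

theorem pv_min_ext {α : Type} [LinearOrder α] (x y : α) (xs ys : List α)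
    (h : ∀ a, a ∈ x :: xs ↔ a ∈ y :: ys) : xs.foldl min x = ys.foldl min y := by
  have hmx : xs.foldl min x ∈ x :: xs := by
    rcases PySem.List.foldl_min_mem xs x with he | he
    · rw [he]; exact List.mem_cons_self ..
    · exact List.mem_cons_of_mem _ he
  have hmy : ys.foldl min y ∈ y :: ys := by
    rcases PySem.List.foldl_min_mem ys y with he | he
    · rw [he]; exact List.mem_cons_self ..
    · exact List.mem_cons_of_mem _ he
  have lbx : ∀ a ∈ x :: xs, xs.foldl min x ≤ a := by
    intro a ha
    rcases List.mem_cons.mp ha with rfl | h'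
    · exact (PySem.List.foldl_min_le xs a).1
    · exact (PySem.List.foldl_min_le xs x).2 a h'
  have lby : ∀ a ∈ y :: ys, ys.foldl min y ≤ a := by
    intro a ha
    rcases List.mem_cons.mp ha with rfl | h'
    · exact (PySem.List.foldl_min_le ys a).1
    · exact (PySem.List.foldl_min_le ys y).2 a h'
  exact le_antisymm (lbx _ ((h _).mpr hmy)) (lby _ ((h _).mp hmx))

-- casting commutes with the running max / min from the head
theorem pv_cast_foldl_max (t : List Nat) : ∀ d : Nat,
    (t.map (fun n : Nat => (n : Int))).foldl max (d : Int) = ((t.foldl max d : Nat) : Int) := by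
  induction t with
  | nil => intro d; rfl
  | cons x t ih => intro d; rw [List.map_cons, List.foldl_cons, List.foldl_cons, ← Nat.cast_max, ih]

theorem pv_cast_foldl_min (t : List Nat) : ∀ d : Nat,
    (t.map (fun n : Nat => (n : Int))).foldl min (d : Int) = ((t.foldl min d : Nat) : Int) := by
  induction t with
  | nil => intro d; rfl
  | cons x t ih => intro d; rw [List.map_cons, List.foldl_cons, List.foldl_cons, ← Nat.cast_min, ih]

-- on the range a digit difference can take, trial-division primality IS membership in (2,3,5,7)
theorem pv_prime_table (n : Int) (h1 : -9 ≤ n) (h2 : n ≤ 9) :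
    pvIsPrime n = [(2 : Int), 3, 5, 7].contains n := by
  have hs : ∀ m : Nat, m ≤ 9 → Nat.sqrt m =
      (if m < 1 then 0 else if m < 4 then 1 else if m < 9 then 2 else 3) := by
    intro m hm; interval_cases m <;> norm_num
  interval_cases n <;>
    first
      | decide
      | (simp only [pvIsPrime]; rw [hs _ (by decide)]; decide)

-- ===== VERDICT (by name: the statement is the Claim_ definition above) =====
theorem digit_difference_prime_spec : Claim_equal_digit_difference_prime := by
  intro password _
  unfold Spec_digit_difference_prime digit_difference_prime digit_difference_prime_alt
  rw [pv_maskfold]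
  simp only [PySem.Set.contains, List.contains_eq_mem]
  set cs := password.toList.filter PySem.Chars.isdigit with hcs
  have hdig : ∀ c ∈ cs, PySem.Chars.isdigit c = true := fun c hc => List.of_mem_filter hc
  have hmap : cs.map (fun c => (PySem.Int.ofChars? [c]).getD 0)
      = (cs.map (fun c => c.toNat - 48)).map (fun n : Nat => (n : Int)) := by
    rw [List.map_map]
    exact List.map_congr_left fun c hc => (pv_digit_val c (hdig c hc)).1
  rw [hmap]
  set dns := cs.map (fun c => c.toNat - 48) with hdns
  have hlt : ∀ d ∈ dns, d < 10 := by
    intro d hd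
    obtain ⟨c, hc, rfl⟩ := List.mem_map.mp hd
    exact (pv_digit_val c (hdig c hc)).2
  set mask := dns.foldl (fun m d => m ||| (1 <<< d)) 0 with hmask
  have hbit : ∀ k, mask.testBit k = decide (k ∈ dns) := by
    intro k; rw [hmask, pv_testBit]; simp
  clear_value mask dns
  clear hmap hdns
  cases dns with
  | nil =>
    -- no digits: A returns False; B's mask is 0, which is not in the table
    have h0 : ¬ (0 : Nat) ∈ pvGood := by
      unfold pvGood
      rw [PySem.Set.mem_ofList, List.mem_filter]
      rintro ⟨hr, -⟩
      rcases List.mem_range'.mp hr with ⟨i, -, hi⟩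
      omega
    subst hmask
    simp [h0]
  | cons d t =>
    have hmask_ne : mask ≠ 0 := by
      intro h0
      have := hbit d
      rw [h0, Nat.zero_testBit] at this
      simp at this
    have hmask_lt : mask < 1024 := by
      rw [hmask]; exact pv_mask_lt _ 0 hlt (by norm_num)
    have hmem_range : mask ∈ List.range' 1 1023 :=
      List.mem_range'.mpr ⟨mask - 1, by omega, by omega⟩
    have hbits : ∀ a, a ∈ pvBits mask ↔ a ∈ d :: t := by
      intro a
      rw [pv_bits_mem]
      constructor
      · rintro ⟨-, hb⟩; have := hbit a; rw [hb] at this; exact of_decide_eq_true this.symm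
      · intro ha; exact ⟨hlt a ha, by rw [hbit a]; simpa using ha⟩
    match hbe : pvBits mask with
    | [] => exact absurd ((hbits d).mpr (List.mem_cons_self ..)) (by rw [hbe]; simp)
    | b :: bt =>
      have hbits' : ∀ a, a ∈ b :: bt ↔ a ∈ d :: t := hbe ▸ hbits
      -- membership in the table is exactly its defining condition at mask
      have hiff : (mask ∈ pvGood) ↔
          ([(2 : Int), 3, 5, 7].contains
            (((bt.foldl max b : Nat) : Int) - ((bt.foldl min b : Nat) : Int)) = true) := by
        unfold pvGood
        rw [PySem.Set.mem_ofList]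
        simp only [List.mem_filter]
        rw [hbe, PySem.List.max?_id_cons, PySem.List.min?_id_cons]
        simp only [Option.getD_some]
        exact ⟨fun h => h.2, fun h => ⟨hmem_range, h⟩⟩
      have hdec : (decide (mask ∈ pvGood) : Bool)
          = [(2 : Int), 3, 5, 7].contains
              (((bt.foldl max b : Nat) : Int) - ((bt.foldl min b : Nat) : Int)) := by
        simp [hiff]
      rw [hdec]
      have hmax_eq : bt.foldl max b = t.foldl max d := pv_max_ext _ _ _ _ hbits'
      have hmin_eq : bt.foldl min b = t.foldl min d := pv_min_ext _ _ _ _ hbits'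
      have hmax_lt : t.foldl max d < 10 := by
        rcases PySem.List.foldl_max_mem t d with he | he
        · rw [he]; exact hlt d (List.mem_cons_self ..)
        · exact hlt _ (List.mem_cons_of_mem _ he)
      have hmin_lt : t.foldl min d < 10 := by
        rcases PySem.List.foldl_min_mem t d with he | he
        · rw [he]; exact hlt d (List.mem_cons_self ..)
        · exact hlt _ (List.mem_cons_of_mem _ he)
      rw [hmax_eq, hmin_eq]
      -- reduce A's max/min over the casted list to the Nat-level running max/min
      rw [List.map_cons, PySem.List.max?_id_cons, PySem.List.min?_id_cons]
      simp only [Option.getD_some]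
      rw [pv_cast_foldl_max, pv_cast_foldl_min]
      by_cases hlen : t = []
      · subst hlen
        simp
      · rw [if_neg (by
          simp only [List.length_cons, List.length_map]
          have : t.length ≠ 0 := fun h => hlen (List.eq_nil_of_length_eq_zero h)
          omega)]
        exact pv_prime_table _ (by omega) (by omega)
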